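-- pv_equiv track=rewrite | github.com/Nurmanbetov/algorithms | codify.py | get_row_sum
-- ===== SOURCE A (Python) =====
-- def get_row_sum(mat, row_ind, col_ind, number):
--
--     col = []
--     for i in range(len(mat)):
--         if i==row_ind:
--             number = abs(sum(mat[i])-number)
--
--         for j in range(len(mat[i])):
--             if j==col_ind:
--                 col.append(mat[i][j])
--     number = abs(sum(col)-number)
--     return number
-- ===== SOURCE B (Python) =====
-- def get_row_sum(mat, row_ind, col_ind, number):
--     # Direct indexing: O(n + m) instead of scanning every cell.
--     if 0 <= row_ind < len(mat):
--         number = abs(sum(mat[row_ind]) - number)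
--     col_sum = sum(row[col_ind] for row in mat if 0 <= col_ind < len(row))
--     return abs(col_sum - number)
-- ===== Notes on version B (the rewrite author's own statement) =====
-- stated objective: faster
-- what changed: B indexes the target row and column entry directly (with range guards) instead of A's nested scan over every cell with index-equality tests, so only one pass over the rows plus one row sum is done.
import Mathlib
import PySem

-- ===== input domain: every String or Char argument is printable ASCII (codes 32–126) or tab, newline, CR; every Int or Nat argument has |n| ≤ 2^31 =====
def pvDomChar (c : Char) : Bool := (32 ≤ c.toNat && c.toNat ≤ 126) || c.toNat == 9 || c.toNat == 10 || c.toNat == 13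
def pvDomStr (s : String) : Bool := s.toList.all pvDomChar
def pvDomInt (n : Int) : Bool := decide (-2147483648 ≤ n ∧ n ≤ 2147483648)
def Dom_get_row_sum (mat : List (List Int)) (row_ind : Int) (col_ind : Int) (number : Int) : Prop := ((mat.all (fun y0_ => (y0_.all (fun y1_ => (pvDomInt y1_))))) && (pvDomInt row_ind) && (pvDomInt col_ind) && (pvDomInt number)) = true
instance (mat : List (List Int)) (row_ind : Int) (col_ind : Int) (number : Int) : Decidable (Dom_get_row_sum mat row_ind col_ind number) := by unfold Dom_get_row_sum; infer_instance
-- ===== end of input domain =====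

-- B replaces A's nested full scan with index-equality tests by direct, range-guarded
-- indexing of the target row and of each row's col_ind-th entry (objective: faster).

-- ===== PORT A =====
-- literal transliteration: 'for i in range(len(mat))' / 'for j in range(len(mat[i]))'
-- as folds over PySem.List.enumerate; state = (col, number).
def get_row_sum (mat : List (List Int)) (row_ind : Int) (col_ind : Int) (number : Int) : Int :=
  let st := (PySem.List.enumerate mat 0).foldl
    (fun (st : List Int × Int) p =>
      let n := if p.1 = row_ind then |p.2.sum - st.2| else st.2
      let col := (PySem.List.enumerate p.2 0).foldl
        (fun c q => if q.1 = col_ind then c ++ [q.2] else c) st.1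
      (col, n))
    ([], number)
  |st.1.sum - st.2|

-- ===== PORT B =====
-- 'if 0 <= row_ind < len(mat): number = abs(sum(mat[row_ind]) - number)' then the
-- guarded generator-sum over rows; the guards guarantee in-range, so getD is exact.
def get_row_sum_alt (mat : List (List Int)) (row_ind : Int) (col_ind : Int) (number : Int) : Int :=
  let n := if 0 ≤ row_ind ∧ row_ind < mat.length then
             |(mat.getD row_ind.toNat []).sum - number| else number
  let colSum := mat.foldl
    (fun s row => if 0 ≤ col_ind ∧ col_ind < row.length then s + row.getD col_ind.toNat 0 else s) 0
  |colSum - n|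

-- ===== PRECONDITION & SPEC =====
def Spec_get_row_sum (mat : List (List Int)) (row_ind : Int) (col_ind : Int) (number : Int) (out : Int) : Prop := out = get_row_sum_alt mat row_ind col_ind number
instance (mat : List (List Int)) (row_ind : Int) (col_ind : Int) (number : Int) (out : Int) : Decidable (Spec_get_row_sum mat row_ind col_ind number out) := by unfold Spec_get_row_sum; infer_instance

-- ===== CLAIM (what is proved, stated in full; the proofs are below) =====
def Claim_equal_get_row_sum : Prop := ∀ (mat : List (List Int)) (row_ind : Int) (col_ind : Int) (number : Int), Dom_get_row_sum mat row_ind col_ind number → Spec_get_row_sum mat row_ind col_ind number (get_row_sum mat row_ind col_ind number)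

-- ===== LEMMAS AND PROOFS =====

-- A's inner loop collects at most the col_ind-th entry of the row.
theorem inner_fold_eq (col_ind : Int) (row : List Int) : ∀ (s : Int) (c : List Int),
    (PySem.List.enumerate row s).foldl
      (fun c q => if q.1 = col_ind then c ++ [q.2] else c) c
    = c ++ (if s ≤ col_ind ∧ col_ind < s + row.length then [row.getD (col_ind - s).toNat 0] else []) := by
  induction row with
  | nil =>
    intro s c
    rw [PySem.List.enumerate_nil, List.foldl_nil,
        if_neg (by simp : ¬ (s ≤ col_ind ∧ col_ind < s + ([] : List Int).length))]
    simp
  | cons x xs ih =>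
    intro s c
    rw [PySem.List.enumerate_cons, List.foldl_cons, ih (s + 1)]
    simp only [List.length_cons, Nat.cast_add, Nat.cast_one]
    by_cases h : s = col_ind
    · subst h
      rw [if_pos rfl, if_neg (by omega : ¬ (s + 1 ≤ s ∧ s < s + 1 + (xs.length : Int))),
          if_pos (by omega : s ≤ s ∧ s < s + ((xs.length : Int) + 1))]
      simp
    · rw [if_neg h]
      by_cases h2 : s + 1 ≤ col_ind ∧ col_ind < s + 1 + (xs.length : Int)
      · rw [if_pos h2, if_pos (by omega : s ≤ col_ind ∧ col_ind < s + ((xs.length : Int) + 1))]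
        have hk : (col_ind - s).toNat = (col_ind - (s + 1)).toNat + 1 := by omega
        simp [hk]
      · rw [if_neg h2, if_neg (by omega : ¬ (s ≤ col_ind ∧ col_ind < s + ((xs.length : Int) + 1)))]

-- the column entry (as a singleton list) contributed by one row
def colPick (col_ind : Int) (row : List Int) : List Int :=
  if 0 ≤ col_ind ∧ col_ind < row.length then [row.getD col_ind.toNat 0] else []

-- A's outer loop, characterised: col = accumulated column picks, number updated at row_ind.
theorem outer_fold_eq (row_ind col_ind : Int) (mat : List (List Int)) :
    ∀ (s : Int) (c : List Int) (n : Int),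
    (PySem.List.enumerate mat s).foldl
      (fun (st : List Int × Int) p =>
        let n := if p.1 = row_ind then |p.2.sum - st.2| else st.2
        let col := (PySem.List.enumerate p.2 0).foldl
          (fun c q => if q.1 = col_ind then c ++ [q.2] else c) st.1
        (col, n))
      (c, n)
    = (c ++ mat.flatMap (colPick col_ind),
       if s ≤ row_ind ∧ row_ind < s + mat.length then
         |(mat.getD (row_ind - s).toNat []).sum - n| else n) := by
  induction mat with
  | nil =>
    intro s c n
    rw [PySem.List.enumerate_nil, List.foldl_nil,
        if_neg (by simp : ¬ (s ≤ row_ind ∧ row_ind < s + ([] : List (List Int)).length))]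
    simp
  | cons x xs ih =>
    intro s c n
    rw [PySem.List.enumerate_cons, List.foldl_cons]
    simp only
    rw [inner_fold_eq col_ind x 0, ih (s + 1)]
    have hc : (if 0 ≤ col_ind ∧ col_ind < 0 + (x.length : Int) then [x.getD (col_ind - 0).toNat 0] else [])
        = colPick col_ind x := by simp [colPick]
    rw [hc]
    simp only [Prod.mk.injEq, List.length_cons, Nat.cast_add, Nat.cast_one]
    refine ⟨by simp [List.flatMap_cons, List.append_assoc], ?_⟩
    by_cases h : s = row_ind
    · subst h
      rw [if_pos rfl, if_neg (by omega : ¬ (s + 1 ≤ s ∧ s < s + 1 + (xs.length : Int))),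
          if_pos (by omega : s ≤ s ∧ s < s + ((xs.length : Int) + 1))]
      simp
    · rw [if_neg h]
      by_cases h2 : s + 1 ≤ row_ind ∧ row_ind < s + 1 + (xs.length : Int)
      · rw [if_pos h2, if_pos (by omega : s ≤ row_ind ∧ row_ind < s + ((xs.length : Int) + 1))]
        have hk : (row_ind - s).toNat = (row_ind - (s + 1)).toNat + 1 := by omega
        simp [hk]
      · rw [if_neg h2, if_neg (by omega : ¬ (s ≤ row_ind ∧ row_ind < s + ((xs.length : Int) + 1)))]

-- B's guarded fold sums exactly the column picks.
theorem colsum_fold_eq (col_ind : Int) (mat : List (List Int)) : ∀ (a : Int),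
    mat.foldl
      (fun s row => if 0 ≤ col_ind ∧ col_ind < row.length then s + row.getD col_ind.toNat 0 else s) a
    = a + (mat.flatMap (colPick col_ind)).sum := by
  induction mat with
  | nil => intro a; simp
  | cons x xs ih =>
    intro a
    rw [List.foldl_cons, ih]
    simp only [List.flatMap_cons, List.sum_append, colPick]
    split_ifs with h
    · simp [List.sum_cons]; ring
    · simp

-- ===== VERDICT (by name: the statement is the Claim_ definition above) =====
theorem get_row_sum_spec : Claim_equal_get_row_sum := by
  intro mat row_ind col_ind number _
  unfold Spec_get_row_sum get_row_sum get_row_sum_alt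
  rw [outer_fold_eq, colsum_fold_eq]
  simp
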